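-- pv_equiv track=rewrite | github.com/choongy57/Raising-Rooves-Model | stage1_segmentation/building_footprint_segmenter.py | _chain_way_node_refs
-- ===== SOURCE A (Python) =====
-- def _chain_way_node_refs(way_segs: list[list[int]]) -> list[int]:
--     """
--     Chain a list of OSM way node-ref sequences into a single ordered ring.
--
--     OSM multipolygon outer rings are sometimes split across multiple ways
--     that need to be stitched end-to-end by matching shared node IDs.
--     """
--     if not way_segs:
--         return []
--     result = list(way_segs[0])
--     remaining = [list(s) for s in way_segs[1:]]
--     while remaining:
--         last_node = result[-1]
--         matched = False
--         for i, seg in enumerate(remaining):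
--             if seg[0] == last_node:
--                 result.extend(seg[1:])
--                 remaining.pop(i)
--                 matched = True
--                 break
--             elif seg[-1] == last_node:
--                 result.extend(list(reversed(seg))[1:])
--                 remaining.pop(i)
--                 matched = True
--                 break
--         if not matched:
--             # Disconnected segment — append as-is and continue
--             result.extend(remaining.pop(0))
--     return result
-- ===== SOURCE B (Python) =====
-- def _first_alive(lst, removed):
--     while lst and lst[0] in removed:
--         lst.pop(0)
--     return lst[0] if lst else None
--
--
-- def _chain_way_node_refs(way_segs: list[list[int]]) -> list[int]:
--     if not way_segs:
--         return []
--     heads, tails = {}, {}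
--     for i in range(1, len(way_segs)):
--         s = way_segs[i]
--         heads.setdefault(s[0], []).append(i)
--         tails.setdefault(s[-1], []).append(i)
--     result = list(way_segs[0])
--     removed = set()
--     next_plain = 1
--     alive = len(way_segs) - 1
--     while alive:
--         last = result[-1]
--         hi = _first_alive(heads.get(last, []), removed)
--         ti = _first_alive(tails.get(last, []), removed)
--         if hi is not None and (ti is None or hi <= ti):
--             removed.add(hi)
--             result.extend(way_segs[hi][1:])
--         elif ti is not None:
--             removed.add(ti)
--             rev = way_segs[ti][::-1]
--             result.extend(rev[1:])
--         else:
--             while next_plain in removed: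
--                 next_plain += 1
--             removed.add(next_plain)
--             result.extend(way_segs[next_plain])
--             next_plain += 1
--         alive -= 1
--     return result
-- ===== Notes on version B (the rewrite author's own statement) =====
-- stated objective: alternative
-- what changed: Instead of rescanning the whole remaining-segment list on every step (and popping from it), B builds head/tail endpoint->sorted-index dictionaries once, keeps a lazy removed-set and a monotone pointer for the smallest unconsumed index, and picks the lowest-index matching segment per step by dictionary lookup.
import Mathlib
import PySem

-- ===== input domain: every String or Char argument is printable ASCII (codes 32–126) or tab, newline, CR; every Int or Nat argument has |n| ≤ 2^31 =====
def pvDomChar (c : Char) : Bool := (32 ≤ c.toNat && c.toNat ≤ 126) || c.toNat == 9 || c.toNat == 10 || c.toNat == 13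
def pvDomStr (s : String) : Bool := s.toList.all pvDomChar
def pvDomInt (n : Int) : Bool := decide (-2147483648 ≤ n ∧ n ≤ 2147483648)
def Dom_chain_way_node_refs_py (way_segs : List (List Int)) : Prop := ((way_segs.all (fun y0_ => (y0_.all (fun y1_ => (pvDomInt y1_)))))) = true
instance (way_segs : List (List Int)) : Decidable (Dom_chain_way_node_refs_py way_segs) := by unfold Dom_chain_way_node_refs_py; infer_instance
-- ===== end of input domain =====

-- B replaces A's per-step rescan of the remaining segments by endpoint->index
-- dictionaries with lazy deletion (objective: alternative; return value only, no mutation).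

-- ===== PORT A =====
-- A's inner 'for i, seg in enumerate(remaining)' scan: the matched extension and
-- remaining with that segment popped, or none when no segment matched
def pvAScan (last : Int) : List (List Int) → Option (List Int × List (List Int))
  | [] => none
  | seg :: rest =>
    if PySem.List.pyGetD seg 0 0 = last then
      some (PySem.List.slice seg (some 1) none, rest)            -- seg[1:]
    else if PySem.List.pyGetD seg (-1) 0 = last then
      some (PySem.List.slice seg.reverse (some 1) none, rest)    -- list(reversed(seg))[1:]
    else
      match pvAScan last rest with
      | some (ext, rest') => some (ext, seg :: rest')
      | none => none

-- used by pvALoop's decreasing_by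
lemma pvAScan_length (last : Int) : ∀ (rem : List (List Int)) ext rem',
    pvAScan last rem = some (ext, rem') → rem'.length + 1 = rem.length := by
  intro rem
  induction rem with
  | nil => intro ext rem' h; simp [pvAScan] at h
  | cons seg rest ih =>
    intro ext rem' h
    simp only [pvAScan] at h
    split_ifs at h with h1 h2
    · cases h; simp
    · cases h; simp
    · cases hs : pvAScan last rest with
      | none => rw [hs] at h; cases h
      | some p =>
        rw [hs] at h
        cases h
        have := ih p.1 p.2 (by rw [hs])
        simp [this]

-- A's 'while remaining' loop
def pvALoop (result : List Int) : List (List Int) → List Int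
  | [] => result
  | seg :: rest =>
    let last := PySem.List.pyGetD result (-1) 0   -- result[-1]
    match hs : pvAScan last (seg :: rest) with
    | some (ext, rest') => pvALoop (result ++ ext) rest'
    | none => pvALoop (result ++ seg) rest        -- remaining.pop(0) appended as-is
termination_by rem => rem.length
decreasing_by
  · have := pvAScan_length last (seg :: rest) ext rest' hs
    simp at this ⊢
    omega
  · simp

def chain_way_node_refs_py (way_segs : List (List Int)) : List Int :=
  match way_segs with
  | [] => []
  | s0 :: rest => pvALoop s0 rest

-- ===== PORT B =====
-- Source B's _first_alive: pop entries of a removed index off the front, return the head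
def pvFirstAlive (removed : PySem.Set Int) : List Int → Option Int × List Int
  | [] => (none, [])
  | i :: rest =>
    if PySem.Set.contains removed i then pvFirstAlive removed rest
    else (some i, i :: rest)

-- Source B's 'while next_plain in removed: next_plain += 1' (fuel bounds the iterations)
def pvSkip (removed : PySem.Set Int) (j : Int) : Nat → Int
  | 0 => j
  | fuel + 1 => if PySem.Set.contains removed j then pvSkip removed (j + 1) fuel else j

-- the 'for i in range(1, len(way_segs))' index-building loop
def pvBuildIdx (ws : List (List Int)) :
    PySem.Dict Int (List Int) × PySem.Dict Int (List Int) :=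
  (PySem.List.pyRange 1 ws.length 1).foldl
    (fun ht i =>
      let s := PySem.List.pyGetD ws i []
      (ht.1.modify (PySem.List.pyGetD s 0 0) [] (fun l => l ++ [i]),
       ht.2.modify (PySem.List.pyGetD s (-1) 0) [] (fun l => l ++ [i])))
    (PySem.Dict.empty, PySem.Dict.empty)

-- Source B's 'while alive' loop; alive is the explicit counter Source B decrements
def pvBLoop (ws : List (List Int)) (heads tails : PySem.Dict Int (List Int))
    (removed : PySem.Set Int) (nextPlain : Int) (result : List Int) :
    Nat → List Int
  | 0 => result
  | alive + 1 =>
    let last := PySem.List.pyGetD result (-1) 0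
    let hp := pvFirstAlive removed (heads.getD last [])
    let heads' := heads.insert last hp.2                 -- in-place pops written back
    let tp := pvFirstAlive removed (tails.getD last [])
    let tails' := tails.insert last tp.2
    match hp.1, tp.1 with
    | some h, none =>
        pvBLoop ws heads' tails' (PySem.Set.add removed h) nextPlain
          (result ++ PySem.List.slice (PySem.List.pyGetD ws h []) (some 1) none) alive
    | some h, some t =>
        if h ≤ t then
          pvBLoop ws heads' tails' (PySem.Set.add removed h) nextPlain
            (result ++ PySem.List.slice (PySem.List.pyGetD ws h []) (some 1) none) alive
        else
          pvBLoop ws heads' tails' (PySem.Set.add removed t) nextPlain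
            (result ++ PySem.List.slice (PySem.List.pyGetD ws t []).reverse (some 1) none) alive
    | none, some t =>
        pvBLoop ws heads' tails' (PySem.Set.add removed t) nextPlain
          (result ++ PySem.List.slice (PySem.List.pyGetD ws t []).reverse (some 1) none) alive
    | none, none =>
        let j := pvSkip removed nextPlain ws.length
        pvBLoop ws heads' tails' (PySem.Set.add removed j) (j + 1)
          (result ++ PySem.List.pyGetD ws j []) alive

def chain_way_node_refs_py_alt (way_segs : List (List Int)) : List Int :=
  match way_segs with
  | [] => []
  | s0 :: _ =>
    let ht := pvBuildIdx way_segs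
    pvBLoop way_segs ht.1 ht.2 PySem.Set.empty 1 s0 (way_segs.length - 1)

-- ===== PRECONDITION & SPEC =====
-- Pre_ excludes exactly the inputs where Python A raises IndexError: with at least
-- two ways, an empty segment makes seg[0]/seg[-1] (or result[-1]) raise.
def Pre_chain_way_node_refs_py (way_segs : List (List Int)) : Prop :=
  way_segs.length ≤ 1 ∨ ∀ s ∈ way_segs, s ≠ []
instance (way_segs : List (List Int)) : Decidable (Pre_chain_way_node_refs_py way_segs) := by
  unfold Pre_chain_way_node_refs_py; infer_instance

def pvWitness_chain_way_node_refs_py : List (List Int) := [[1, 2], [2, 3], [4, 3]]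

def Spec_chain_way_node_refs_py (way_segs : List (List Int)) (out : List Int) : Prop :=
  out = chain_way_node_refs_py_alt way_segs
instance (way_segs : List (List Int)) (out : List Int) :
    Decidable (Spec_chain_way_node_refs_py way_segs out) := by
  unfold Spec_chain_way_node_refs_py; infer_instance

-- ===== CLAIM (what is proved, stated in full; the proofs are below) =====
def Claim_equal_chain_way_node_refs_py : Prop :=
  ∀ (way_segs : List (List Int)), Dom_chain_way_node_refs_py way_segs →
    Pre_chain_way_node_refs_py way_segs →
    Spec_chain_way_node_refs_py way_segs (chain_way_node_refs_py way_segs)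

-- ===== LEMMAS AND PROOFS =====

def pvSeg (ws : List (List Int)) (i : Int) : List Int := PySem.List.pyGetD ws i []
def pvHd (ws : List (List Int)) (i : Int) : Int := PySem.List.pyGetD (pvSeg ws i) 0 0
def pvTl (ws : List (List Int)) (i : Int) : Int := PySem.List.pyGetD (pvSeg ws i) (-1) 0
def pvP (ws : List (List Int)) (last i : Int) : Bool :=
  pvHd ws i == last || pvTl ws i == last
def pvExt (ws : List (List Int)) (last i : Int) : List Int :=
  if pvHd ws i = last then PySem.List.slice (pvSeg ws i) (some 1) none
  else PySem.List.slice (pvSeg ws i).reverse (some 1) none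

-- characterization of A's scan over remaining = L.map (pvSeg ws)
lemma pvAScan_map (ws : List (List Int)) (last : Int) : ∀ L : List Int,
    pvAScan last (L.map (pvSeg ws)) =
      match L.find? (pvP ws last) with
      | none => none
      | some j => some (pvExt ws last j, (L.eraseP (pvP ws last)).map (pvSeg ws)) := by
  intro L
  induction L with
  | nil => simp [pvAScan]
  | cons j tl ih =>
    simp only [List.map_cons, pvAScan]
    by_cases h1 : pvHd ws j = last
    · have hp : pvP ws last j = true := by simp [pvP, h1]
      rw [List.find?_cons_of_pos hp, List.eraseP_cons_of_pos hp]
      rw [if_pos (show PySem.List.pyGetD (pvSeg ws j) 0 0 = last from h1)]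
      simp [pvExt, h1]
    · by_cases h2 : pvTl ws j = last
      · have hp : pvP ws last j = true := by simp [pvP, h2]
        rw [List.find?_cons_of_pos hp, List.eraseP_cons_of_pos hp]
        rw [if_neg (show ¬ PySem.List.pyGetD (pvSeg ws j) 0 0 = last from h1),
            if_pos (show PySem.List.pyGetD (pvSeg ws j) (-1) 0 = last from h2)]
        simp [pvExt, h1]
      · have hp : pvP ws last j = false := by simp [pvP, h1, h2]
        rw [if_neg (show ¬ PySem.List.pyGetD (pvSeg ws j) 0 0 = last from h1),
            if_neg (show ¬ PySem.List.pyGetD (pvSeg ws j) (-1) 0 = last from h2)]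
        have hp' : ¬ pvP ws last j = true := by simp [hp]
        rw [List.find?_cons_of_neg hp', List.eraseP_cons_of_neg hp', ih]
        cases hf : tl.find? (pvP ws last) with
        | none => simp
        | some j' => simp

lemma pvFirstAlive_eq (removed : PySem.Set Int) : ∀ hL : List Int,
    pvFirstAlive removed hL =
      ((hL.dropWhile (fun i => PySem.Set.contains removed i)).head?,
        hL.dropWhile (fun i => PySem.Set.contains removed i)) := by
  intro hL
  induction hL with
  | nil => simp [pvFirstAlive]
  | cons i rest ih =>
    by_cases h : i ∈ removed
    · simp [pvFirstAlive, h, ih]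
    · simp [pvFirstAlive, h]

lemma pv_mem_dropWhile {p : Int → Bool} : ∀ {l : List Int} {x : Int},
    x ∈ l → p x = false → x ∈ l.dropWhile p := by
  intro l
  induction l with
  | nil => intro x h; simp at h
  | cons a tl ih =>
    intro x hx hpx
    by_cases ha : p a
    · rw [List.dropWhile_cons_of_pos ha]
      rcases List.mem_cons.mp hx with rfl | h
      · rw [hpx] at ha; cases ha
      · exact ih h hpx
    · rw [List.dropWhile_cons_of_neg ha]; exact hx

lemma pv_head_dropWhile {p : Int → Bool} : ∀ {l : List Int} {x : Int},
    (l.dropWhile p).head? = some x → p x = false := by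
  intro l
  induction l with
  | nil => intro x h; simp at h
  | cons a tl ih =>
    intro x h
    by_cases ha : p a
    · rw [List.dropWhile_cons_of_pos ha] at h; exact ih h
    · rw [List.dropWhile_cons_of_neg ha] at h
      simp at h
      subst h
      simpa using ha

lemma pv_find?_eq_some_min {p : Int → Bool} : ∀ {L : List Int} {j : Int},
    L.Pairwise (· < ·) → j ∈ L → p j = true → (∀ i ∈ L, p i = true → j ≤ i) →
    L.find? p = some j := by
  intro L
  induction L with
  | nil => intro j _ h; simp at h
  | cons a tl ih =>
    intro j hs hj hpj hmin
    rcases List.pairwise_cons.mp hs with ⟨hlt, htl⟩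
    by_cases ha : p a
    · have h1 : j ≤ a := hmin a (by simp) ha
      have h2 : a ≤ j := by
        rcases List.mem_cons.mp hj with rfl | h
        · exact le_refl _
        · exact le_of_lt (hlt j h)
      have : j = a := le_antisymm h1 h2
      subst this
      simp [List.find?_cons, ha]
    · have hj' : j ∈ tl := by
        rcases List.mem_cons.mp hj with rfl | h
        · exact absurd hpj ha
        · exact h
      rw [List.find?_cons_of_neg ha]
      exact ih htl hj' hpj (fun i hi => hmin i (List.mem_cons_of_mem _ hi))

lemma pv_mem_eraseP {p : Int → Bool} : ∀ {L : List Int} {j : Int},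
    L.Nodup → L.find? p = some j →
    ∀ i, i ∈ L.eraseP p ↔ (i ∈ L ∧ i ≠ j) := by
  intro L
  induction L with
  | nil => intro j _ h; simp at h
  | cons a tl ih =>
    intro j hnd hf i
    rcases List.nodup_cons.mp hnd with ⟨hna, hndtl⟩
    by_cases ha : p a
    · rw [List.find?_cons_of_pos ha] at hf
      injection hf with hf; subst hf
      rw [List.eraseP_cons_of_pos ha]
      constructor
      · intro h
        exact ⟨List.mem_cons_of_mem _ h, fun hij => hna (hij ▸ h)⟩
      · rintro ⟨h1, h2⟩
        rcases List.mem_cons.mp h1 with rfl | h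
        · exact absurd rfl h2
        · exact h
    · rw [List.find?_cons_of_neg ha] at hf
      rw [List.eraseP_cons_of_neg ha]
      have hj : j ∈ tl := List.mem_of_find?_eq_some hf
      constructor
      · intro h
        rcases List.mem_cons.mp h with rfl | h
        · exact ⟨by simp, fun hij => hna (hij ▸ hj)⟩
        · rcases (ih hndtl hf i).mp h with ⟨h1, h2⟩
          exact ⟨List.mem_cons_of_mem _ h1, h2⟩
      · rintro ⟨h1, h2⟩
        rcases List.mem_cons.mp h1 with rfl | h
        · exact List.mem_cons_self
        · exact List.mem_cons_of_mem _ ((ih hndtl hf i).mpr ⟨h, h2⟩)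

lemma pv_length_eraseP {p : Int → Bool} : ∀ {L : List Int} {j : Int},
    L.find? p = some j → (L.eraseP p).length + 1 = L.length := by
  intro L
  induction L with
  | nil => intro j h; simp at h
  | cons a tl ih =>
    intro j hf
    by_cases ha : p a
    · rw [List.eraseP_cons_of_pos ha]; simp
    · rw [List.find?_cons_of_neg ha] at hf
      rw [List.eraseP_cons_of_neg ha]
      simp [ih hf]
lemma pv_contains_false (s : PySem.Set Int) (x : Int) :
    (PySem.Set.contains s x = false) ↔ x ∉ s := by
  simp

def pvHInv (ws : List (List Int)) (f : Int → Int) (L : List Int)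
    (d : PySem.Dict Int (List Int)) : Prop :=
  ∀ v : Int,
    (d.getD v []).Pairwise (· < ·) ∧
    (∀ i ∈ d.getD v [], 1 ≤ i ∧ i < (ws.length : Int) ∧ f i = v) ∧
    (∀ i ∈ L, f i = v → i ∈ d.getD v [])

structure PvInv (ws : List (List Int)) (L : List Int)
    (heads tails : PySem.Dict Int (List Int)) (removed : PySem.Set Int)
    (nextPlain : Int) : Prop where
  sorted : L.Pairwise (· < ·)
  bounds : ∀ i ∈ L, 1 ≤ i ∧ i < (ws.length : Int)
  notrem : ∀ i : Int, 1 ≤ i → i < (ws.length : Int) →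
      (PySem.Set.contains removed i = false ↔ i ∈ L)
  hinv : pvHInv ws (pvHd ws) L heads
  tinv : pvHInv ws (pvTl ws) L tails
  np1 : 1 ≤ nextPlain
  npmin : ∀ i ∈ L, nextPlain ≤ i

-- what the first alive entry of an endpoint list is: none = no alive match in L,
-- some h = the least alive match
lemma pvSel (ws : List (List Int)) (L : List Int) (removed : PySem.Set Int)
    (f : Int → Int) (v : Int) (dl : List Int)
    (hPW : dl.Pairwise (· < ·))
    (hSound : ∀ i ∈ dl, 1 ≤ i ∧ i < (ws.length : Int) ∧ f i = v)
    (hComp : ∀ i ∈ L, f i = v → i ∈ dl)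
    (hbounds : ∀ i ∈ L, 1 ≤ i ∧ i < (ws.length : Int))
    (notrem : ∀ i : Int, 1 ≤ i → i < (ws.length : Int) →
      (PySem.Set.contains removed i = false ↔ i ∈ L)) :
    (((dl.dropWhile (fun i => PySem.Set.contains removed i)).head? = none →
        ∀ i ∈ L, f i ≠ v) ∧
      (∀ h, (dl.dropWhile (fun i => PySem.Set.contains removed i)).head? = some h →
        h ∈ L ∧ f h = v ∧ ∀ i ∈ L, f i = v → h ≤ i)) := by
  have hsubl : List.Sublist (dl.dropWhile (fun i => PySem.Set.contains removed i)) dl :=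
    List.dropWhile_sublist _
  have hmemr : ∀ i ∈ L, f i = v →
      i ∈ dl.dropWhile (fun i => PySem.Set.contains removed i) := by
    intro i hi hf
    have hidl : i ∈ dl := hComp i hi hf
    have hb := hbounds i hi
    have : PySem.Set.contains removed i = false := (notrem i hb.1 hb.2).mpr hi
    exact pv_mem_dropWhile hidl this
  constructor
  · intro hnone i hi hf
    have := hmemr i hi hf
    rw [List.head?_eq_none_iff.mp hnone] at this
    simp at this
  · intro h hh
    have hhr : h ∈ dl.dropWhile (fun i => PySem.Set.contains removed i) :=
      List.mem_of_mem_head? hh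
    have hhd : h ∈ dl := hsubl.subset hhr
    have hsnd := hSound h hhd
    have hcf : PySem.Set.contains removed h = false := pv_head_dropWhile hh
    have hhL : h ∈ L := (notrem h hsnd.1 hsnd.2.1).mp hcf
    refine ⟨hhL, hsnd.2.2, ?_⟩
    intro i hi hf
    have hir := hmemr i hi hf
    have hPWr : (dl.dropWhile (fun i => PySem.Set.contains removed i)).Pairwise (· < ·) :=
      hPW.sublist hsubl
    cases hr : dl.dropWhile (fun i => PySem.Set.contains removed i) with
    | nil => rw [hr] at hir; simp at hir
    | cons a t =>
      rw [hr] at hh hir hPWr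
      simp at hh
      subst hh
      rcases List.mem_cons.mp hir with rfl | hit
      · exact le_refl _
      · exact le_of_lt ((List.pairwise_cons.mp hPWr).1 i hit)

lemma pvSkip_spec (removed : PySem.Set Int) (k : Int) :
    ∀ (fuel : Nat) (j : Int), j ≤ k → k - j < (fuel : Int) →
    (∀ m : Int, j ≤ m → m < k → PySem.Set.contains removed m = true) →
    PySem.Set.contains removed k = false →
    pvSkip removed j fuel = k := by
  intro fuel
  induction fuel with
  | zero => intro j h1 h2 _ _; exfalso; push_cast at h2; omega
  | succ n ih =>
    intro j h1 h2 hmid hk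
    by_cases hj : j = k
    · subst hj
      have hk' := (pv_contains_false _ _).mp hk
      simp [pvSkip, hk']
    · have hjk : j < k := lt_of_le_of_ne h1 hj
      have hcj : PySem.Set.contains removed j = true := hmid j le_rfl hjk
      simp only [pvSkip]
      rw [if_pos hcj]
      exact ih (j + 1) (by omega) (by push_cast at h2 ⊢; omega)
        (fun m hm1 hm2 => hmid m (by omega) hm2) hk

lemma pvHInv_insert (ws : List (List Int)) (f : Int → Int) (L L' : List Int)
    (d : PySem.Dict Int (List Int)) (removed : PySem.Set Int)
    (h : pvHInv ws f L d)
    (hbounds : ∀ i ∈ L, 1 ≤ i ∧ i < (ws.length : Int))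
    (notrem : ∀ i : Int, 1 ≤ i → i < (ws.length : Int) →
      (PySem.Set.contains removed i = false ↔ i ∈ L))
    (v0 : Int) (hsub : ∀ i ∈ L', i ∈ L) :
    pvHInv ws f L'
      (d.insert v0 ((d.getD v0 []).dropWhile (fun i => PySem.Set.contains removed i))) := by
  intro v
  by_cases hv : v = v0
  · subst hv
    rw [PySem.Dict.getD_insert_self]
    have hsubl : List.Sublist ((d.getD v []).dropWhile (fun i => PySem.Set.contains removed i))
        (d.getD v []) := List.dropWhile_sublist _
    refine ⟨(h v).1.sublist hsubl, ?_, ?_⟩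
    · intro i hi
      exact (h v).2.1 i (hsubl.subset hi)
    · intro i hi hf
      have hiL : i ∈ L := hsub i hi
      have hb := hbounds i hiL
      have hcf : PySem.Set.contains removed i = false := (notrem i hb.1 hb.2).mpr hiL
      exact pv_mem_dropWhile ((h v).2.2 i hiL hf) hcf
  · rw [PySem.Dict.getD_insert_of_ne d _ _ hv]
    exact ⟨(h v).1, (h v).2.1, fun i hi hf => (h v).2.2 i (hsub i hi) hf⟩

lemma pvInv_core (ws : List (List Int)) (L : List Int)
    (heads tails : PySem.Dict Int (List Int)) (removed : PySem.Set Int)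
    (nextPlain : Int) (inv : PvInv ws L heads tails removed nextPlain)
    (j : Int) (L' : List Int) (hsub : List.Sublist L' L)
    (hmem : ∀ i, i ∈ L' ↔ i ∈ L ∧ i ≠ j)
    (np' : Int) (hnp1 : 1 ≤ np') (hnpmin : ∀ i ∈ L', np' ≤ i) (last : Int) :
    PvInv ws L'
      (heads.insert last ((heads.getD last []).dropWhile (fun i => PySem.Set.contains removed i)))
      (tails.insert last ((tails.getD last []).dropWhile (fun i => PySem.Set.contains removed i)))
      (PySem.Set.add removed j) np' := by
  refine ⟨inv.sorted.sublist hsub, ?_, ?_, ?_, ?_, hnp1, hnpmin⟩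
  · intro i hi
    exact inv.bounds i ((hmem i).mp hi).1
  · intro i h1 h2
    rw [pv_contains_false, PySem.Set.mem_add, hmem i]
    rw [← inv.notrem i h1 h2, pv_contains_false]
    constructor
    · intro hni
      push_neg at hni
      exact ⟨hni.1, hni.2⟩
    · intro hni
      push_neg
      exact hni
  · exact pvHInv_insert ws (pvHd ws) L L' heads removed inv.hinv inv.bounds inv.notrem
      last (fun i hi => ((hmem i).mp hi).1)
  · exact pvHInv_insert ws (pvTl ws) L L' tails removed inv.tinv inv.bounds inv.notrem
      last (fun i hi => ((hmem i).mp hi).1)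
lemma pvAScan_map_some (ws : List (List Int)) (last : Int) (L : List Int) (j : Int)
    (h : L.find? (pvP ws last) = some j) :
    pvAScan last (L.map (pvSeg ws)) =
      some (pvExt ws last j, (L.eraseP (pvP ws last)).map (pvSeg ws)) := by
  rw [pvAScan_map, h]

lemma pvAScan_map_none (ws : List (List Int)) (last : Int) (L : List Int)
    (h : L.find? (pvP ws last) = none) :
    pvAScan last (L.map (pvSeg ws)) = none := by
  rw [pvAScan_map, h]

def pvStep (ws : List (List Int))
    (ht : PySem.Dict Int (List Int) × PySem.Dict Int (List Int)) (i : Int) :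
    PySem.Dict Int (List Int) × PySem.Dict Int (List Int) :=
  let s := PySem.List.pyGetD ws i []
  (ht.1.modify (PySem.List.pyGetD s 0 0) [] (fun l => l ++ [i]),
   ht.2.modify (PySem.List.pyGetD s (-1) 0) [] (fun l => l ++ [i]))

lemma pvBuildIdx_eq (ws : List (List Int)) :
    pvBuildIdx ws = (PySem.List.pyRange 1 ws.length 1).foldl (pvStep ws)
      (PySem.Dict.empty, PySem.Dict.empty) := rfl

lemma pvBuild_aux (ws : List (List Int)) : ∀ (k : Nat) (v : Int),
    (((PySem.List.pyRange 1 (1 + (k : Int)) 1).foldl (pvStep ws)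
        (PySem.Dict.empty, PySem.Dict.empty)).1.getD v [] =
      (PySem.List.pyRange 1 (1 + (k : Int)) 1).filter (fun i => pvHd ws i == v)) ∧
    (((PySem.List.pyRange 1 (1 + (k : Int)) 1).foldl (pvStep ws)
        (PySem.Dict.empty, PySem.Dict.empty)).2.getD v [] =
      (PySem.List.pyRange 1 (1 + (k : Int)) 1).filter (fun i => pvTl ws i == v)) := by
  intro k
  induction k with
  | zero =>
    intro v
    rw [show ((1 : Int) + ((0 : Nat) : Int)) = 1 by norm_num]
    rw [PySem.List.pyRange_one_eq_nil le_rfl]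
    simp [PySem.Dict.getD_empty]
  | succ m ih =>
    intro v
    have hcast : (1 + (((m + 1 : Nat)) : Int)) = (1 + (m : Int)) + 1 := by push_cast; ring
    rw [hcast, PySem.List.pyRange_one_succ_right (by omega : (1 : Int) ≤ 1 + (m : Int))]
    rw [List.foldl_append, List.filter_append, List.filter_append]
    simp only [List.foldl_cons, List.foldl_nil, List.filter_cons, List.filter_nil]
    set P := (PySem.List.pyRange 1 (1 + (m : Int)) 1).foldl (pvStep ws)
      (PySem.Dict.empty, PySem.Dict.empty) with hP
    have hstep1 : (pvStep ws P (1 + (m : Int))).1 =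
        P.1.modify (pvHd ws (1 + (m : Int))) [] (fun l => l ++ [1 + (m : Int)]) := rfl
    have hstep2 : (pvStep ws P (1 + (m : Int))).2 =
        P.2.modify (pvTl ws (1 + (m : Int))) [] (fun l => l ++ [1 + (m : Int)]) := rfl
    rw [hstep1, hstep2, PySem.Dict.getD_modify, PySem.Dict.getD_modify]
    constructor
    · by_cases hv : v = pvHd ws (1 + (m : Int))
      · rw [if_pos hv, (ih (pvHd ws (1 + (m : Int)))).1, hv]
        simp
      · rw [if_neg hv, (ih v).1]
        have hb : (pvHd ws (1 + (m : Int)) == v) = false := by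
          simp
          exact fun hc => hv hc.symm
        rw [hb]
        simp
    · by_cases hv : v = pvTl ws (1 + (m : Int))
      · rw [if_pos hv, (ih (pvTl ws (1 + (m : Int)))).2, hv]
        simp
      · rw [if_neg hv, (ih v).2]
        have hb : (pvTl ws (1 + (m : Int)) == v) = false := by
          simp
          exact fun hc => hv hc.symm
        rw [hb]
        simp

lemma pvBuildIdx_getD (ws : List (List Int)) (v : Int) :
    ((pvBuildIdx ws).1.getD v [] =
      (PySem.List.pyRange 1 ws.length 1).filter (fun i => pvHd ws i == v)) ∧
    ((pvBuildIdx ws).2.getD v [] =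
      (PySem.List.pyRange 1 ws.length 1).filter (fun i => pvTl ws i == v)) := by
  rw [pvBuildIdx_eq]
  rcases Nat.eq_zero_or_pos ws.length with h0 | hpos
  · rw [h0]
    rw [show (((0 : Nat)) : Int) = 0 by norm_num]
    rw [PySem.List.pyRange_one_eq_nil (by norm_num)]
    simp [PySem.Dict.getD_empty]
  · have hcast : ((ws.length : Int)) = 1 + ((ws.length - 1 : Nat) : Int) := by push_cast; omega
    rw [hcast]
    exact pvBuild_aux ws (ws.length - 1) v

lemma pvALoop_matched (result seg : List Int) (rest rest' : List (List Int)) (ext : List Int)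
    (h : pvAScan (PySem.List.pyGetD result (-1) 0) (seg :: rest) = some (ext, rest')) :
    pvALoop result (seg :: rest) = pvALoop (result ++ ext) rest' := by
  rw [pvALoop]
  split
  · rename_i ext1 rest1 hs
    rw [h] at hs
    cases hs
    rfl
  · rename_i hs
    rw [h] at hs
    cases hs

lemma pvALoop_plain (result seg : List Int) (rest : List (List Int))
    (h : pvAScan (PySem.List.pyGetD result (-1) 0) (seg :: rest) = none) :
    pvALoop result (seg :: rest) = pvALoop (result ++ seg) rest := by
  rw [pvALoop]
  split
  · rename_i ext1 rest1 hs
    rw [h] at hs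
    cases hs
  · rfl

lemma pv_step_close (ws : List (List Int)) (a : Nat) (j0 : Int) (Ltl : List Int)
    (heads tails : PySem.Dict Int (List Int)) (removed : PySem.Set Int)
    (nextPlain : Int) (result : List Int) (last j : Int) (E : List Int)
    (hlast : last = PySem.List.pyGetD result (-1) 0)
    (inv : PvInv ws (j0 :: Ltl) heads tails removed nextPlain)
    (hlen : a + 1 = (j0 :: Ltl).length)
    (IH : ∀ (L' : List Int) (heads' tails' : PySem.Dict Int (List Int))
      (removed' : PySem.Set Int) (np' : Int) (result' : List Int),
      PvInv ws L' heads' tails' removed' np' → a = L'.length →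
      pvALoop result' (L'.map (pvSeg ws)) = pvBLoop ws heads' tails' removed' np' result' a)
    (hfind : (j0 :: Ltl).find? (pvP ws last) = some j)
    (hE : pvExt ws last j = E) :
    pvALoop result ((j0 :: Ltl).map (pvSeg ws)) =
      pvBLoop ws
        (heads.insert last
          ((heads.getD last []).dropWhile (fun i => PySem.Set.contains removed i)))
        (tails.insert last
          ((tails.getD last []).dropWhile (fun i => PySem.Set.contains removed i)))
        (PySem.Set.add removed j) nextPlain (result ++ E) a := by
  have hscan := pvAScan_map_some ws last (j0 :: Ltl) j hfind
  rw [hE] at hscan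
  rw [List.map_cons] at hscan
  have hA : pvALoop result ((j0 :: Ltl).map (pvSeg ws)) =
      pvALoop (result ++ E) (((j0 :: Ltl).eraseP (pvP ws last)).map (pvSeg ws)) := by
    rw [List.map_cons]
    exact pvALoop_matched result (pvSeg ws j0) (Ltl.map (pvSeg ws)) _ E (by rw [← hlast]; exact hscan)
  rw [hA]
  have nodup : (j0 :: Ltl).Nodup := inv.sorted.imp (fun h => ne_of_lt h)
  have hmem := pv_mem_eraseP nodup hfind
  apply IH
  · exact pvInv_core ws (j0 :: Ltl) heads tails removed nextPlain inv j _
      List.eraseP_sublist hmem nextPlain inv.np1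
      (fun i hi => inv.npmin i ((hmem i).mp hi).1) last
  · have hl := pv_length_eraseP hfind
    simp only [List.length_cons] at hl hlen
    omega

lemma pv_plain_close (ws : List (List Int)) (a : Nat) (j0 : Int) (Ltl : List Int)
    (heads tails : PySem.Dict Int (List Int)) (removed : PySem.Set Int)
    (nextPlain : Int) (result : List Int) (last : Int)
    (hlast : last = PySem.List.pyGetD result (-1) 0)
    (inv : PvInv ws (j0 :: Ltl) heads tails removed nextPlain)
    (hlen : a + 1 = (j0 :: Ltl).length)
    (IH : ∀ (L' : List Int) (heads' tails' : PySem.Dict Int (List Int))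
      (removed' : PySem.Set Int) (np' : Int) (result' : List Int),
      PvInv ws L' heads' tails' removed' np' → a = L'.length →
      pvALoop result' (L'.map (pvSeg ws)) = pvBLoop ws heads' tails' removed' np' result' a)
    (hfind : (j0 :: Ltl).find? (pvP ws last) = none) :
    pvALoop result ((j0 :: Ltl).map (pvSeg ws)) =
      pvBLoop ws
        (heads.insert last
          ((heads.getD last []).dropWhile (fun i => PySem.Set.contains removed i)))
        (tails.insert last
          ((tails.getD last []).dropWhile (fun i => PySem.Set.contains removed i)))
        (PySem.Set.add removed j0) (j0 + 1)
        (result ++ PySem.List.pyGetD ws j0 []) a := by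
  have hscan := pvAScan_map_none ws last (j0 :: Ltl) hfind
  rw [List.map_cons] at hscan
  have hA : pvALoop result ((j0 :: Ltl).map (pvSeg ws)) =
      pvALoop (result ++ pvSeg ws j0) (Ltl.map (pvSeg ws)) := by
    rw [List.map_cons]
    exact pvALoop_plain result (pvSeg ws j0) (Ltl.map (pvSeg ws)) (by rw [← hlast]; exact hscan)
  rw [hA]
  have nodup : (j0 :: Ltl).Nodup := inv.sorted.imp (fun h => ne_of_lt h)
  have hmem : ∀ i, i ∈ Ltl ↔ (i ∈ j0 :: Ltl ∧ i ≠ j0) := by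
    intro i
    constructor
    · intro hi
      refine ⟨List.mem_cons_of_mem _ hi, ?_⟩
      intro hij
      exact (List.nodup_cons.mp nodup).1 (hij ▸ hi)
    · rintro ⟨h1, h2⟩
      rcases List.mem_cons.mp h1 with rfl | h
      · exact absurd rfl h2
      · exact h
  have hb0 := inv.bounds j0 List.mem_cons_self
  show pvALoop (result ++ pvSeg ws j0) (Ltl.map (pvSeg ws)) = _
  apply IH
  · exact pvInv_core ws (j0 :: Ltl) heads tails removed nextPlain inv j0 Ltl
      (List.sublist_cons_self _ _) hmem (j0 + 1) (by omega)
      (fun i hi => by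
        have := (List.pairwise_cons.mp inv.sorted).1 i hi
        omega) last
  · simp only [List.length_cons] at hlen
    omega

lemma pvLoop_eq (ws : List (List Int)) : ∀ (alive : Nat) (L : List Int)
    (heads tails : PySem.Dict Int (List Int)) (removed : PySem.Set Int)
    (nextPlain : Int) (result : List Int),
    PvInv ws L heads tails removed nextPlain → alive = L.length →
    pvALoop result (L.map (pvSeg ws)) =
      pvBLoop ws heads tails removed nextPlain result alive := by
  intro alive
  induction alive with
  | zero =>
    intro L heads tails removed nextPlain result inv hlen
    have hL : L = [] := by
      cases L with
      | nil => rfl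
      | cons x t => simp at hlen
    subst hL
    simp [pvALoop, pvBLoop]
  | succ a ih =>
    intro L heads tails removed nextPlain result inv hlen
    cases L with
    | nil => simp at hlen
    | cons j0 Ltl =>
      simp only [pvBLoop, pvFirstAlive_eq]
      set last := PySem.List.pyGetD result (-1) 0 with hlast
      have hSH := pvSel ws (j0 :: Ltl) removed (pvHd ws) last (heads.getD last [])
        (inv.hinv last).1 (inv.hinv last).2.1 (inv.hinv last).2.2 inv.bounds inv.notrem
      have hST := pvSel ws (j0 :: Ltl) removed (pvTl ws) last (tails.getD last [])
        (inv.tinv last).1 (inv.tinv last).2.1 (inv.tinv last).2.2 inv.bounds inv.notrem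
      cases hH : ((heads.getD last []).dropWhile (fun i => PySem.Set.contains removed i)).head? with
      | some h =>
        obtain ⟨hhL, hhdv, hhmin⟩ := hSH.2 h hH
        cases hT : ((tails.getD last []).dropWhile (fun i => PySem.Set.contains removed i)).head? with
        | some t =>
          obtain ⟨htL, htlv, htmin⟩ := hST.2 t hT
          dsimp only
          by_cases hht : h ≤ t
          · rw [if_pos hht]
            apply pv_step_close ws a j0 Ltl heads tails removed nextPlain result last h _ hlast inv hlen ih
            · apply pv_find?_eq_some_min inv.sorted hhL (by simp [pvP, hhdv])
              intro i hi hpi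
              rcases (by simpa [pvP] using hpi : pvHd ws i = last ∨ pvTl ws i = last) with hp1 | hp2
              · exact hhmin i hi hp1
              · exact le_trans hht (htmin i hi hp2)
            · rw [pvExt, if_pos hhdv]
              rfl
          · rw [if_neg hht]
            have hnt : pvHd ws t ≠ last := by
              intro hc
              exact hht (hhmin t htL hc)
            apply pv_step_close ws a j0 Ltl heads tails removed nextPlain result last t _ hlast inv hlen ih
            · apply pv_find?_eq_some_min inv.sorted htL (by simp [pvP, htlv])
              intro i hi hpi
              rcases (by simpa [pvP] using hpi : pvHd ws i = last ∨ pvTl ws i = last) with hp1 | hp2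
              · have := hhmin i hi hp1
                omega
              · exact htmin i hi hp2
            · rw [pvExt, if_neg hnt]
              rfl
        | none =>
          dsimp only
          apply pv_step_close ws a j0 Ltl heads tails removed nextPlain result last h _ hlast inv hlen ih
          · apply pv_find?_eq_some_min inv.sorted hhL (by simp [pvP, hhdv])
            intro i hi hpi
            rcases (by simpa [pvP] using hpi : pvHd ws i = last ∨ pvTl ws i = last) with hp1 | hp2
            · exact hhmin i hi hp1
            · exact absurd hp2 (hST.1 hT i hi)
          · rw [pvExt, if_pos hhdv]
            rfl
      | none =>
        cases hT : ((tails.getD last []).dropWhile (fun i => PySem.Set.contains removed i)).head? with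
        | some t =>
          obtain ⟨htL, htlv, htmin⟩ := hST.2 t hT
          have hnt : pvHd ws t ≠ last := fun hc => (hSH.1 hH t htL) hc
          dsimp only
          apply pv_step_close ws a j0 Ltl heads tails removed nextPlain result last t _ hlast inv hlen ih
          · apply pv_find?_eq_some_min inv.sorted htL (by simp [pvP, htlv])
            intro i hi hpi
            rcases (by simpa [pvP] using hpi : pvHd ws i = last ∨ pvTl ws i = last) with hp1 | hp2
            · exact absurd hp1 (hSH.1 hH i hi)
            · exact htmin i hi hp2
          · rw [pvExt, if_neg hnt]
            rfl
        | none =>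
          dsimp only
          have hj0 : j0 ∈ j0 :: Ltl := List.mem_cons_self
          have hb0 := inv.bounds j0 hj0
          have hskip : pvSkip removed nextPlain ws.length = j0 := by
            apply pvSkip_spec removed j0 ws.length nextPlain (inv.npmin j0 hj0)
              (by have := inv.np1; omega)
            · intro m hm1 hm2
              have h1m : 1 ≤ m := le_trans inv.np1 hm1
              have hmn : m < (ws.length : Int) := by omega
              have hnL : m ∉ j0 :: Ltl := by
                intro hmL
                rcases List.mem_cons.mp hmL with rfl | hmt
                · omega
                · have := (List.pairwise_cons.mp inv.sorted).1 m hmt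
                  omega
              cases hc : PySem.Set.contains removed m with
              | true => rfl
              | false => exact absurd ((inv.notrem m h1m hmn).mp hc) hnL
            · exact (inv.notrem j0 hb0.1 hb0.2).mpr hj0
          rw [hskip]
          apply pv_plain_close ws a j0 Ltl heads tails removed nextPlain result last hlast inv hlen ih
          apply List.find?_eq_none.mpr
          intro i hi
          simp only [pvP, Bool.or_eq_true, beq_iff_eq]
          push_neg
          exact ⟨hSH.1 hH i hi, hST.1 hT i hi⟩

lemma pvInv_init (s0 : List Int) (rest : List (List Int)) :
    PvInv (s0 :: rest) (PySem.List.pyRange 1 (s0 :: rest).length 1)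
      (pvBuildIdx (s0 :: rest)).1 (pvBuildIdx (s0 :: rest)).2 PySem.Set.empty 1 := by
  refine ⟨PySem.List.pairwise_lt_pyRange_one _ _, ?_, ?_, ?_, ?_, le_refl _, ?_⟩
  · intro i hi
    exact PySem.List.mem_pyRange_one.mp hi
  · intro i h1 h2
    constructor
    · intro _
      exact PySem.List.mem_pyRange_one.mpr ⟨h1, h2⟩
    · intro _
      rfl
  · intro v
    rw [(pvBuildIdx_getD _ v).1]
    refine ⟨(PySem.List.pairwise_lt_pyRange_one _ _).filter _, ?_, ?_⟩
    · intro i hi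
      rw [List.mem_filter] at hi
      have hb := PySem.List.mem_pyRange_one.mp hi.1
      exact ⟨hb.1, hb.2, by simpa using hi.2⟩
    · intro i hi hf
      rw [List.mem_filter]
      exact ⟨hi, by simpa using hf⟩
  · intro v
    rw [(pvBuildIdx_getD _ v).2]
    refine ⟨(PySem.List.pairwise_lt_pyRange_one _ _).filter _, ?_, ?_⟩
    · intro i hi
      rw [List.mem_filter] at hi
      have hb := PySem.List.mem_pyRange_one.mp hi.1
      exact ⟨hb.1, hb.2, by simpa using hi.2⟩
    · intro i hi hf
      rw [List.mem_filter]
      exact ⟨hi, by simpa using hf⟩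
  · intro i hi
    exact (PySem.List.mem_pyRange_one.mp hi).1

-- ===== VERDICT (by name: the statement is the Claim_ definition above) =====
theorem chain_way_node_refs_py_spec : Claim_equal_chain_way_node_refs_py := by
  unfold Claim_equal_chain_way_node_refs_py
  intro ws _hdom _hpre
  unfold Spec_chain_way_node_refs_py
  cases ws with
  | nil => rfl
  | cons s0 rest =>
    have hmap : (PySem.List.pyRange 1 (s0 :: rest).length 1).map (pvSeg (s0 :: rest)) = rest := by
      have := PySem.List.map_pyGetD_pyRange (s0 :: rest) ([] : List Int) (a := 1) (by norm_num)
      simpa [pvSeg, PySem.List.len] using this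
    have hlen : rest.length = (PySem.List.pyRange 1 (s0 :: rest).length 1).length := by
      rw [PySem.List.length_pyRange_one]
      simp
    have hmain := pvLoop_eq (s0 :: rest) rest.length (PySem.List.pyRange 1 (s0 :: rest).length 1)
      (pvBuildIdx (s0 :: rest)).1 (pvBuildIdx (s0 :: rest)).2 PySem.Set.empty 1 s0
      (pvInv_init s0 rest) hlen
    rw [hmap] at hmain
    simpa [chain_way_node_refs_py, chain_way_node_refs_py_alt] using hmain
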